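-- pv_equiv track=rewrite | github.com/jsoncodez/python | apostrophes.py | apost
-- ===== SOURCE A (Python) =====
-- def apost(string_list, index_count):
--     """
--     :param string_list: takes list version of string inputted by user
--     :param index_count: counter to determine base case and index position within list
--     :return: Base case returns amended string with apostrophes added.
--     Recursive part returns individual words and checks specified conditions to add or forgo adding apostrophes.
--     """
--
--     # BASE CASE
--     if index_count == len(string_list):
--         #converts final amended list of words back into string
--         string_sentence = ' '.join(string_list)
--         return string_sentence
--
--     #RECURSIVE CASE
--     else:
--
--         #condition to forgo adding an apostrophy in the case where word is not alphanumeric or word does not end in an 's'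
--         if string_list[index_count].isalnum() == False or string_list[index_count][-1] != 's' and string_list[index_count][-1] != 's'.upper():
--             return apost(string_list, index_count + 1)
--
--         #condition left over are words that are alphanumeric and end in 's'.
--         else:
--             #Isolates word by the string in specific index count,
--             #takes first character in the word to 2nd last letter(removing the 's') and concatenates the "'s".
--             #Replaces modified word into same index
--             if string_list[index_count][-1].islower():
--                 string_list[index_count] = string_list[index_count][0:len(string_list[index_count])-1] + "'s"
--             else:
--                 string_list[index_count] = string_list[index_count][0:len(string_list[index_count])-1] + "'s".upper()
--
--             return apost(string_list, index_count + 1)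
-- ===== SOURCE B (Python) =====
-- def apost(string_list, index_count):
--     """Iterative re-implementation: one explicit loop instead of recursion.
--
--     Mutates string_list in place exactly as the recursive original does,
--     then joins once at the end."""
--     for i in range(index_count, len(string_list)):
--         word = string_list[i]
--         if word.isalnum() and (word[-1] == 's' or word[-1] == 'S'):
--             string_list[i] = word[:-1] + ("'s" if word[-1] == 's' else "'S")
--     return ' '.join(string_list)
-- ===== Notes on version B (the rewrite author's own statement) =====
-- stated objective: idiomatic
-- what changed: Replaces the head recursion (one Python call frame per word) by a single explicit for-loop over range(index_count, len) with one in-place update per word; same mutation of the list, join once at the end.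
-- crash fix: On index_count > len(string_list) A raises IndexError (the recursion indexes past the end); B's loop range is empty there and it returns the words joined unchanged. — e.g. on apost(["as"], 2): A raises IndexError, B returns "as"
import Mathlib
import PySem

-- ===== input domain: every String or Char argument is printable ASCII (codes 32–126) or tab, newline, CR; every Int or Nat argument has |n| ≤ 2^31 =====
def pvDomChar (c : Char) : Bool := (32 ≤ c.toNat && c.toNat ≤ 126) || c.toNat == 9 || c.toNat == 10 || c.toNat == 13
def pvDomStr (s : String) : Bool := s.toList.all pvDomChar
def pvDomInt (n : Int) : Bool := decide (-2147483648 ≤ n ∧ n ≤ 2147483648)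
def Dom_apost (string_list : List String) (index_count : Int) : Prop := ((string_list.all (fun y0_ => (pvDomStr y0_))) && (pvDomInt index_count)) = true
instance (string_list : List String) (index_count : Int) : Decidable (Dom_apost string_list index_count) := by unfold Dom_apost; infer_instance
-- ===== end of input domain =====

-- B replaces A's recursion by a single explicit for-loop (same in-place list mutation, join once
-- at the end); equivalence is about the return value, the mutation performed is the same.

-- ===== PORT A =====
def apost (string_list : List String) (index_count : Int) : String :=
  if index_count = (string_list.length : Int) then
    PySem.Str.join " " string_list
  else
    match h : PySem.List.pyGet? string_list index_count with
    | none => ""            -- Python raises IndexError here (outside Pre_apost)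
    | some word =>
      if PySem.Str.strIsalnum word = false ∨
         (PySem.Str.pyGet? word (-1) ≠ some 's' ∧ PySem.Str.pyGet? word (-1) ≠ some 'S') then
        apost string_list (index_count + 1)
      else
        match PySem.Str.pyGet? word (-1) with
        | none => ""        -- unreachable: the guard established word[-1] exists
        | some c =>
          if PySem.Str.islower c then
            apost (PySem.List.pySetD string_list index_count
                    (PySem.Str.slice word (some 0) (some (PySem.Str.len word - 1)) ++ "'s"))
                  (index_count + 1)
          else
            apost (PySem.List.pySetD string_list index_count
                    (PySem.Str.slice word (some 0) (some (PySem.Str.len word - 1)) ++ PySem.Str.upper "'s"))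
                  (index_count + 1)
termination_by ((string_list.length : Int) - index_count).toNat
decreasing_by
  all_goals
    · have hin : PySem.Raise.InRange string_list.length index_count := by
        by_contra hc
        rw [← PySem.List.pyGet?_eq_none_iff] at hc
        simp [hc] at h
      obtain ⟨h1, h2⟩ := hin
      first
        | (simp only [PySem.List.length_pySetD]; omega)
        | omega

-- ===== PORT B =====
def apost_alt (string_list : List String) (index_count : Int) : String :=
  PySem.Str.join " "
    ((PySem.List.pyRange index_count (string_list.length : Int)).foldl
      (fun acc i =>
        match PySem.List.pyGet? acc i with
        | none => acc       -- Python raises IndexError here (outside Pre_apost)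
        | some word =>
          if PySem.Str.strIsalnum word &&
             ((PySem.Str.pyGet? word (-1) == some 's') || (PySem.Str.pyGet? word (-1) == some 'S')) then
            PySem.List.pySetD acc i
              (PySem.Str.slice word none (some (-1)) ++
                (if PySem.Str.pyGet? word (-1) == some 's' then "'s" else "'S"))
          else acc)
      string_list)

-- ===== PRECONDITION & SPEC =====
-- Pre_ excludes exactly the inputs on which A raises IndexError: index_count beyond ±len(string_list).
def Pre_apost (string_list : List String) (index_count : Int) : Prop :=
  -(string_list.length : Int) ≤ index_count ∧ index_count ≤ (string_list.length : Int)
instance (string_list : List String) (index_count : Int) : Decidable (Pre_apost string_list index_count) := by unfold Pre_apost; infer_instance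
def pvWitness_apost : List String × Int := (["the", "cats", "TOYS"], 0)

-- On index_count > len(string_list) A raises IndexError (it indexes past the end); B's loop range is empty and it returns the words joined unchanged.
def Raises_apost (string_list : List String) (index_count : Int) : Prop :=
  (string_list.length : Int) < index_count
instance (string_list : List String) (index_count : Int) : Decidable (Raises_apost string_list index_count) := by unfold Raises_apost; infer_instance
def pvRaiseWitness_apost : List String × Int := (["as"], 2)
def pvRaiseWitnessOut_apost : String := "as"

def Spec_apost (string_list : List String) (index_count : Int) (out : String) : Prop := out = apost_alt string_list index_count
instance (string_list : List String) (index_count : Int) (out : String) : Decidable (Spec_apost string_list index_count out) := by unfold Spec_apost; infer_instance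

-- ===== CLAIM (what is proved, stated in full; the proofs are below) =====
def Claim_equal_apost : Prop := ∀ (string_list : List String) (index_count : Int), Dom_apost string_list index_count → Pre_apost string_list index_count → Spec_apost string_list index_count (apost string_list index_count)
def Claim_raises_apost : Prop := (∀ (string_list : List String) (index_count : Int), Dom_apost string_list index_count → Raises_apost string_list index_count → ¬ Pre_apost string_list index_count) ∧ (Dom_apost (pvRaiseWitness_apost.1) (pvRaiseWitness_apost.2) ∧ Raises_apost (pvRaiseWitness_apost.1) (pvRaiseWitness_apost.2) ∧ apost_alt (pvRaiseWitness_apost.1) (pvRaiseWitness_apost.2) = pvRaiseWitnessOut_apost)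

-- ===== LEMMAS AND PROOFS =====

-- B's loop step, named so the proofs can speak about one iteration.
def bstep (acc : List String) (i : Int) : List String :=
  match PySem.List.pyGet? acc i with
  | none => acc
  | some word =>
    if PySem.Str.strIsalnum word &&
       ((PySem.Str.pyGet? word (-1) == some 's') || (PySem.Str.pyGet? word (-1) == some 'S')) then
      PySem.List.pySetD acc i
        (PySem.Str.slice word none (some (-1)) ++
          (if PySem.Str.pyGet? word (-1) == some 's' then "'s" else "'S"))
    else acc

lemma alt_eq (sl : List String) (ic : Int) :
    apost_alt sl ic = PySem.Str.join " " ((PySem.List.pyRange ic (sl.length : Int)).foldl bstep sl) := rfl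

lemma length_bstep (acc : List String) (i : Int) : (bstep acc i).length = acc.length := by
  unfold bstep
  split
  · rfl
  · split
    · rw [PySem.List.length_pySetD]
    · rfl

lemma alt_step (sl : List String) (ic : Int) (hlt : ic < (sl.length : Int)) :
    apost_alt sl ic = apost_alt (bstep sl ic) (ic + 1) := by
  rw [alt_eq, alt_eq, length_bstep, PySem.List.pyRange_one_cons hlt, List.foldl_cons]

-- A's amended word equals B's amended word, for a word whose last char c is 's' or 'S'.
lemma fix_eq (word : String) (c : Char) (hc : PySem.Str.pyGet? word (-1) = some c)
    (hcs : c = 's' ∨ c = 'S') :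
    (if PySem.Str.islower c then
        PySem.Str.slice word (some 0) (some (PySem.Str.len word - 1)) ++ "'s"
      else
        PySem.Str.slice word (some 0) (some (PySem.Str.len word - 1)) ++ PySem.Str.upper "'s")
    = PySem.Str.slice word none (some (-1)) ++
        (if (some c == some 's') then "'s" else "'S") := by
  have hne : word.toList ≠ [] := by
    intro hnil
    rw [PySem.Str.pyGet?_eq, PySem.Chars.pyGet?_eq_listPyGet?, hnil] at hc
    simp [PySem.List.pyGet?] at hc
  have hslice : PySem.Str.slice word (some 0) (some (PySem.Str.len word - 1))
      = PySem.Str.slice word none (some (-1)) := by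
    apply String.toList_inj.mp
    rw [PySem.Str.toList_slice, PySem.Str.toList_slice,
        PySem.Chars.slice_eq_listSlice, PySem.Chars.slice_eq_listSlice,
        PySem.List.slice_zero_start, PySem.List.slice_to_neg_one]
    have hlen : 1 ≤ word.toList.length := List.length_pos_iff.mpr hne
    rw [PySem.Str.len, PySem.List.slice_to _ (by omega : (0:Int) ≤ (word.toList.length : Int) - 1)]
    rw [List.dropLast_eq_take]
    congr 1
    omega
  rw [hslice]
  rcases hcs with rfl | rfl
  · rw [if_pos (by decide : PySem.Str.islower 's' = true),
        if_pos (by decide : ((some 's' : Option Char) == some 's') = true)]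
  · rw [if_neg (by decide : ¬ PySem.Str.islower 'S' = true),
        if_neg (by decide : ¬ ((some 'S' : Option Char) == some 's') = true)]
    have : PySem.Str.upper "'s" = "'S" := by decide
    rw [this]

lemma main_equiv : ∀ (n : Nat) (sl : List String) (ic : Int),
    ((sl.length : Int) - ic).toNat = n → -(sl.length : Int) ≤ ic → ic ≤ (sl.length : Int) →
    apost sl ic = apost_alt sl ic := by
  intro n
  induction n with
  | zero =>
    intro sl ic hn h1 h2
    have hic : ic = (sl.length : Int) := by omega
    subst hic
    rw [apost, alt_eq, PySem.List.pyRange_one_eq_nil le_rfl, List.foldl_nil, if_pos rfl]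
  | succ n ih =>
    intro sl ic hn h1 h2
    have hlt : ic < (sl.length : Int) := by omega
    have hIR : PySem.Raise.InRange sl.length ic := ⟨h1, hlt⟩
    have hsome : PySem.List.pyGet? sl ic ≠ none := fun hnone =>
      (PySem.List.pyGet?_eq_none_iff sl ic).mp hnone hIR
    obtain ⟨word, hw⟩ := Option.ne_none_iff_exists'.mp hsome
    rw [alt_step sl ic hlt]
    have hstep : bstep sl ic =
        if PySem.Str.strIsalnum word &&
           ((PySem.Str.pyGet? word (-1) == some 's') || (PySem.Str.pyGet? word (-1) == some 'S')) then
          PySem.List.pySetD sl ic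
            (PySem.Str.slice word none (some (-1)) ++
              (if PySem.Str.pyGet? word (-1) == some 's' then "'s" else "'S"))
        else sl := by
      unfold bstep
      rw [hw]
    rw [apost]
    rw [if_neg (by omega : ¬ ic = (sl.length : Int))]
    split
    case h_1 heq => rw [hw] at heq; cases heq
    case h_2 w' heq =>
    rw [hw] at heq
    injection heq with he
    subst he
    by_cases hg : PySem.Str.strIsalnum word = false ∨
        (PySem.Str.pyGet? word (-1) ≠ some 's' ∧ PySem.Str.pyGet? word (-1) ≠ some 'S')
    · -- skip branch: the guard fails on both sides
      rw [if_pos hg]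
      have hb : (PySem.Str.strIsalnum word &&
          ((PySem.Str.pyGet? word (-1) == some 's') || (PySem.Str.pyGet? word (-1) == some 'S'))) = false := by
        rcases hg with hA | ⟨hs, hS⟩
        · rw [hA, Bool.false_and]
        · have e1 : (PySem.Str.pyGet? word (-1) == some 's') = false := beq_eq_false_iff_ne.mpr hs
          have e2 : (PySem.Str.pyGet? word (-1) == some 'S') = false := beq_eq_false_iff_ne.mpr hS
          rw [e1, e2]
          cases PySem.Str.strIsalnum word <;> rfl
      rw [hb, if_neg (by decide : ¬ false = true)] at hstep
      rw [hstep]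
      exact ih sl (ic + 1) (by omega) (by omega) (by omega)
    · -- amend branch: both sides replace the word, with the same new word (fix_eq)
      rw [if_neg hg]
      push Not at hg
      obtain ⟨halnum, hlast⟩ := hg
      rw [ne_eq, Bool.not_eq_false] at halnum
      have hc : PySem.Str.pyGet? word (-1) = some 's' ∨ PySem.Str.pyGet? word (-1) = some 'S' := by
        by_cases he : PySem.Str.pyGet? word (-1) = some 's'
        · exact Or.inl he
        · exact Or.inr (hlast he)
      obtain ⟨c, hcsome, hcs⟩ : ∃ c, PySem.Str.pyGet? word (-1) = some c ∧ (c = 's' ∨ c = 'S') := by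
        rcases hc with h | h
        · exact ⟨'s', h, Or.inl rfl⟩
        · exact ⟨'S', h, Or.inr rfl⟩
      have hb : (PySem.Str.strIsalnum word &&
          ((PySem.Str.pyGet? word (-1) == some 's') || (PySem.Str.pyGet? word (-1) == some 'S'))) = true := by
        rw [halnum, Bool.true_and]
        rcases hc with h | h <;> rw [h] <;> decide
      rw [hb, if_pos (by decide : (true = true))] at hstep
      rw [hstep]
      simp only [hcsome]
      rw [← fix_eq word c hcsome hcs]
      by_cases hl : PySem.Str.islower c = true
      · rw [if_pos hl, if_pos hl]
        apply ih
        · rw [PySem.List.length_pySetD]; omega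
        · rw [PySem.List.length_pySetD]; omega
        · rw [PySem.List.length_pySetD]; omega
      · rw [if_neg hl, if_neg hl]
        apply ih
        · rw [PySem.List.length_pySetD]; omega
        · rw [PySem.List.length_pySetD]; omega
        · rw [PySem.List.length_pySetD]; omega

-- ===== VERDICT (by name: the statement is the Claim_ definition above) =====
theorem apost_spec : Claim_equal_apost := by
  intro sl ic _ hpre
  exact main_equiv ((sl.length : Int) - ic).toNat sl ic rfl hpre.1 hpre.2

def apost_raises : Claim_raises_apost := by
  unfold Claim_raises_apost
  constructor
  · intro sl ic _ hr hpre
    exact absurd hpre.2 (by unfold Raises_apost at hr; omega)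
  · refine ⟨by decide, by decide, by decide⟩
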